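-- pv_equiv track=rewrite | github.com/Darkninjaspace/New-folder | advCompSci9.py | findPlaces
-- ===== SOURCE A (Python) =====
-- def findPlaces(mapRow,mapRowElement,map,row,col):
--    housePlaces = []
--    hospitalPlaces = []
--    for i in range (0,row,1):
--       col = len(map[mapRow])
--       for p in range (0,col,1):
--          if "house" == map[mapRow][mapRowElement]:
--             startPosRowElement = mapRowElement
--             startPosRow = mapRow
--             group = (startPosRow),(startPosRowElement)
--             housePlaces.append(group)
--          if "hospital" == map[mapRow][mapRowElement]:
--             startPosRowElement = mapRowElement
--             startPosRow = mapRow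
--             group = (startPosRow),(startPosRowElement)
--             hospitalPlaces.append(group)
--          mapRowElement += 1
--       mapRow += 1
--       mapRowElement = 0
--    return housePlaces, hospitalPlaces
-- ===== SOURCE B (Python) =====
-- def findPlaces(mapRow, mapRowElement, map, row, col):
--     # One recursive sweep that groups every cell position by its VALUE in a dict
--     # (value -> list of (r, c)); the two answers are then just dictionary lookups.
--     index = {}
--     def scan(i):
--         if i >= row:
--             return
--         r = mapRow + i
--         for c, cell in enumerate(map[r]):
--             index.setdefault(cell, []).append((r, c))
--         scan(i + 1)
--     scan(0)
--     return index.get("house", []), index.get("hospital", [])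
-- ===== Notes on version B (the rewrite author's own statement) =====
-- stated objective: alternative
-- what changed: B replaces A's per-cell comparisons against the two targets with two mutable accumulator lists by a single recursive sweep that builds a value-to-positions dictionary index (setdefault/append) and then answers both queries by dictionary lookup.
-- intended difference: For negative mapRowElement (with row > 0) A starts its first-row scan at a wrapped offset and reports house/hospital cells of the wrapped tail with NEGATIVE column indices (e.g. (0,-1)), an artefact of reusing the parameter as loop counter; B reports every cell with its true nonnegative column index, the intended grid position. — e.g. on findPlaces(0, -1, [["x", "house"]], 1, 0): A returns ([(0, -1)], []), B returns ([(0, 1)], [])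
import Mathlib
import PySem

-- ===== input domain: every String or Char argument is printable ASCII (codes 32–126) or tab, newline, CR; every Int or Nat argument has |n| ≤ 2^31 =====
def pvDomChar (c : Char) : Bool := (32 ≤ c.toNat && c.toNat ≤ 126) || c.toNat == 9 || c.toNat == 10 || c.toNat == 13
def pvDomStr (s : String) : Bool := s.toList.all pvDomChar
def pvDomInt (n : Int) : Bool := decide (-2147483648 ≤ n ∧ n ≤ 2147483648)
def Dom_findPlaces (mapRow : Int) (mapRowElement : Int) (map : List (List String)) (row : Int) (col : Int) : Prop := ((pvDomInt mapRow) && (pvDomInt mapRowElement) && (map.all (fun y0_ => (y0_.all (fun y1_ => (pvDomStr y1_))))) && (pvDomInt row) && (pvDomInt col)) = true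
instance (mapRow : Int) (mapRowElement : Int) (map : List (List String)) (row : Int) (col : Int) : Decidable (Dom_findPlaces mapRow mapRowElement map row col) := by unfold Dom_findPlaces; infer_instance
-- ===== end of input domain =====

-- B builds a value→positions dictionary index in one recursive sweep and answers both
-- queries by lookup, instead of A's per-cell target comparisons with two accumulator
-- lists; objective: alternative.  A's return value only is compared (A mutates no argument).

-- ===== PORT A =====
-- inner loop body of A (one step of 'for p in range(0, col, 1)'): state (mapRowElement, housePlaces, hospitalPlaces)
def stepInnerA (map : List (List String)) (mr : Int)
    (s : Int × List (Int × Int) × List (Int × Int)) : Int × List (Int × Int) × List (Int × Int) :=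
  let me := s.1
  let cell := (PySem.List.pyGet? ((PySem.List.pyGet? map mr).getD []) me).getD ""
  let hs := if cell = "house" then s.2.1 ++ [(mr, me)] else s.2.1
  let ho := if cell = "hospital" then s.2.2 ++ [(mr, me)] else s.2.2
  (me + 1, hs, ho)

-- outer loop body of A (one step of 'for i in range(0, row, 1)'): state (mapRow, mapRowElement, housePlaces, hospitalPlaces)
def stepOuterA (map : List (List String))
    (st : Int × Int × List (Int × Int) × List (Int × Int)) :
    Int × Int × List (Int × Int) × List (Int × Int) :=
  let mr := st.1
  let col : Int := (((PySem.List.pyGet? map mr).getD []).length : Int)   -- col = len(map[mapRow])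
  let s2 := (PySem.List.pyRange 0 col 1).foldl (fun s _ => stepInnerA map mr s) (st.2.1, st.2.2.1, st.2.2.2)
  (mr + 1, 0, s2.2.1, s2.2.2)                                            -- mapRow += 1; mapRowElement = 0

def findPlaces (mapRow : Int) (mapRowElement : Int) (map : List (List String)) (row : Int) (col : Int) : (List (Int × Int)) × (List (Int × Int)) :=
  let st := (PySem.List.pyRange 0 row 1).foldl (fun s _ => stepOuterA map s)
              (mapRow, mapRowElement, ([] : List (Int × Int)), ([] : List (Int × Int)))
  (st.2.2.1, st.2.2.2)

-- ===== PORT B =====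
-- 'for c, cell in enumerate(map[r]): index.setdefault(cell, []).append((r, c))'
def rowStepB (r : Int) (cells : List String) (d : PySem.Dict String (List (Int × Int))) :
    PySem.Dict String (List (Int × Int)) :=
  (PySem.List.enumerate cells).foldl
    (fun d p => d.modify p.2 [] (fun l => l ++ [(r, p.1)])) d

-- 'def scan(i): if i >= row: return; ...; scan(i+1)' — fuel = remaining iterations (row - i)
def scanB (map : List (List String)) : Nat → Int → PySem.Dict String (List (Int × Int)) →
    PySem.Dict String (List (Int × Int))
  | 0, _, d => d
  | n + 1, r, d => scanB map n (r + 1) (rowStepB r ((PySem.List.pyGet? map r).getD []) d)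

def findPlaces_alt (mapRow : Int) (mapRowElement : Int) (map : List (List String)) (row : Int) (col : Int) : (List (Int × Int)) × (List (Int × Int)) :=
  let d := scanB map row.toNat mapRow PySem.Dict.empty
  (d.getD "house" [], d.getD "hospital" [])

-- ===== PRECONDITION & SPEC =====
-- Pre_ is exactly "A returns normally": every scanned row index is in range (IndexError otherwise),
-- and the first-row start offset mapRowElement keeps every inner index in range (for row > 0 that
-- means -len(map[mapRow]) ≤ mapRowElement ≤ 0, or that first row is empty).
def Pre_findPlaces (mapRow : Int) (mapRowElement : Int) (map : List (List String)) (row : Int) (col : Int) : Prop :=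
  (0 < row → -(map.length : Int) ≤ mapRow ∧ mapRow + row ≤ (map.length : Int)) ∧
  (0 < row →
    (((PySem.List.pyGet? map mapRow).getD []).length = 0 ∨
     (-((((PySem.List.pyGet? map mapRow).getD []).length : Nat) : Int) ≤ mapRowElement ∧ mapRowElement ≤ 0)))
instance (mapRow : Int) (mapRowElement : Int) (map : List (List String)) (row : Int) (col : Int) : Decidable (Pre_findPlaces mapRow mapRowElement map row col) := by unfold Pre_findPlaces; infer_instance

def pvWitness_findPlaces : Int × Int × List (List String) × Int × Int := (0, 0, [["house"]], 1, 0)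

-- For negative mapRowElement (with row > 0) A starts its first-row scan at a wrapped offset and
-- reports house/hospital cells of the wrapped tail with NEGATIVE column indices, an artefact of
-- reusing the parameter as loop counter; B reports their true nonnegative column index, the
-- intended grid position.
def D_findPlaces (mapRow : Int) (mapRowElement : Int) (map : List (List String)) (row : Int) (col : Int) : Prop :=
  0 < row ∧ mapRowElement < 0 ∧
  ∃ s ∈ PySem.List.slice (PySem.List.pyGetD map mapRow []) (some mapRowElement),
    s = "house" ∨ s = "hospital"
instance (mapRow : Int) (mapRowElement : Int) (map : List (List String)) (row : Int) (col : Int) : Decidable (D_findPlaces mapRow mapRowElement map row col) := by unfold D_findPlaces; infer_instance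

def Spec_findPlaces (mapRow : Int) (mapRowElement : Int) (map : List (List String)) (row : Int) (col : Int) (out : (List (Int × Int)) × (List (Int × Int))) : Prop := ¬ D_findPlaces mapRow mapRowElement map row col → out = findPlaces_alt mapRow mapRowElement map row col
instance (mapRow : Int) (mapRowElement : Int) (map : List (List String)) (row : Int) (col : Int) (out : (List (Int × Int)) × (List (Int × Int))) : Decidable (Spec_findPlaces mapRow mapRowElement map row col out) := by unfold Spec_findPlaces; infer_instance

def pvDiffWitness_findPlaces : Int × Int × List (List String) × Int × Int := (0, -1, [["x", "house"]], 1, 0)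
def pvDiffWitnessOut_findPlaces : ((List (Int × Int)) × (List (Int × Int))) × ((List (Int × Int)) × (List (Int × Int))) :=
  (([(0, -1)], []), ([(0, 1)], []))

-- ===== CLAIM (what is proved, stated in full; the proofs are below) =====
def Claim_unchanged_findPlaces : Prop := ∀ (mapRow : Int) (mapRowElement : Int) (map : List (List String)) (row : Int) (col : Int), Dom_findPlaces mapRow mapRowElement map row col → Pre_findPlaces mapRow mapRowElement map row col → Spec_findPlaces mapRow mapRowElement map row col (findPlaces mapRow mapRowElement map row col)
def Claim_changed_findPlaces : Prop := Dom_findPlaces (pvDiffWitness_findPlaces.1) (pvDiffWitness_findPlaces.2.1) (pvDiffWitness_findPlaces.2.2.1) (pvDiffWitness_findPlaces.2.2.2.1) (pvDiffWitness_findPlaces.2.2.2.2) ∧ Pre_findPlaces (pvDiffWitness_findPlaces.1) (pvDiffWitness_findPlaces.2.1) (pvDiffWitness_findPlaces.2.2.1) (pvDiffWitness_findPlaces.2.2.2.1) (pvDiffWitness_findPlaces.2.2.2.2) ∧ D_findPlaces (pvDiffWitness_findPlaces.1) (pvDiffWitness_findPlaces.2.1) (pvDiffWitness_findPlaces.2.2.1)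 (pvDiffWitness_findPlaces.2.2.2.1) (pvDiffWitness_findPlaces.2.2.2.2) ∧ findPlaces (pvDiffWitness_findPlaces.1) (pvDiffWitness_findPlaces.2.1) (pvDiffWitness_findPlaces.2.2.1) (pvDiffWitness_findPlaces.2.2.2.1) (pvDiffWitness_findPlaces.2.2.2.2) = pvDiffWitnessOut_findPlaces.1 ∧ findPlaces_alt (pvDiffWitness_findPlaces.1) (pvDiffWitness_findPlaces.2.1) (pvDiffWitness_findPlaces.2.2.1) (pvDiffWitness_findPlaces.2.2.2.1) (pvDiffWitness_findPlaces.2.2.2.2) = pvDiffWitnessOut_findPlaces.2 ∧ pvDiffWitnessOut_findPlaces.1 ≠ pvDiffWitnessOut_findPlaces.2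
def Claim_exact_findPlaces : Prop := ∀ (mapRow : Int) (mapRowElement : Int) (map : List (List String)) (row : Int) (col : Int), Dom_findPlaces mapRow mapRowElement map row col → Pre_findPlaces mapRow mapRowElement map row col → D_findPlaces mapRow mapRowElement map row col → findPlaces mapRow mapRowElement map row col ≠ findPlaces_alt mapRow mapRowElement map row col

-- ===== LEMMAS AND PROOFS =====

lemma pv_foldl_const_step {α : Type} {β : Type} (F : α → α) (l : List β) (i : α) :
    l.foldl (fun s _ => F s) i = F^[l.length] i := by
  induction l generalizing i with
  | nil => rfl
  | cons a l ih => simp [ih, Function.iterate_succ_apply]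

lemma pv_length_pyRange_zero (m : Int) : (PySem.List.pyRange 0 m 1).length = m.toNat := by
  by_cases h : 0 ≤ m
  · obtain ⟨n, rfl⟩ := Int.eq_ofNat_of_zero_le h
    rw [PySem.List.pyRange_zero_natCast]; simp
  · have he : PySem.List.pyRange 0 m 1 = [] := by
      simp [PySem.List.pyRange]; omega
    rw [he]; simp; omega

-- the pairs A's first-row scan records, as a function of the start offset me
def scanRowT (rowL : List String) (r : Int) (me : Int) (n : Nat) (tgt : String) : List (Int × Int) :=
  (List.range n).filterMap (fun (p : Nat) =>
    if (PySem.List.pyGet? rowL (me + (p : Int))).getD "" = tgt then some (r, me + (p : Int)) else none)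

def collT (map : List (List String)) (mr : Int) (k : Nat) (tgt : String) : List (Int × Int) :=
  (List.range k).flatMap (fun (i : Nat) =>
    scanRowT ((PySem.List.pyGet? map (mr + (i : Int))).getD []) (mr + (i : Int)) 0
      ((PySem.List.pyGet? map (mr + (i : Int))).getD []).length tgt)

lemma scanRowT_succ (rowL : List String) (r me : Int) (k : Nat) (tgt : String) :
    scanRowT rowL r me (k + 1) tgt
      = scanRowT rowL r me k tgt
        ++ (if (PySem.List.pyGet? rowL (me + (k : Int))).getD "" = tgt then [(r, me + (k : Int))] else []) := by
  simp only [scanRowT, List.range_succ, List.filterMap_append]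
  split_ifs with h <;> simp [h]

lemma inner_iter (map : List (List String)) (mr : Int) (n : Nat) :
    ∀ (me : Int) (hs ho : List (Int × Int)),
    (fun s => stepInnerA map mr s)^[n] (me, hs, ho)
      = (me + (n : Int),
         hs ++ scanRowT ((PySem.List.pyGet? map mr).getD []) mr me n "house",
         ho ++ scanRowT ((PySem.List.pyGet? map mr).getD []) mr me n "hospital") := by
  induction n with
  | zero => intro me hs ho; simp [scanRowT]
  | succ k ih =>
    intro me hs ho
    rw [Function.iterate_succ_apply', ih, scanRowT_succ, scanRowT_succ]
    simp only [stepInnerA]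
    split_ifs <;> simp_all <;> push_cast <;> ring

lemma collT_succ_left (map : List (List String)) (mr : Int) (k : Nat) (tgt : String) :
    collT map mr (k + 1) tgt
      = scanRowT ((PySem.List.pyGet? map mr).getD []) mr 0
          ((PySem.List.pyGet? map mr).getD []).length tgt
        ++ collT map (mr + 1) k tgt := by
  simp only [collT, List.range_succ_eq_map, List.flatMap_cons, List.flatMap_map]
  congr 1
  · simp
  · refine List.flatMap_congr (fun i _ => ?_)
    have h : mr + ((i : Int) + 1) = mr + 1 + (i : Int) := by ring
    push_cast
    rw [h]

lemma outer_iter (map : List (List String)) (k : Nat) :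
    ∀ (mr : Int) (hs ho : List (Int × Int)),
    (fun st => stepOuterA map st)^[k] (mr, 0, hs, ho)
      = (mr + (k : Int), 0, hs ++ collT map mr k "house", ho ++ collT map mr k "hospital") := by
  induction k with
  | zero => intro mr hs ho; simp [collT]
  | succ n ih =>
    intro mr hs ho
    rw [Function.iterate_succ_apply]
    have h1 : stepOuterA map (mr, 0, hs, ho)
        = (mr + 1, 0,
           hs ++ scanRowT ((PySem.List.pyGet? map mr).getD []) mr 0
             ((PySem.List.pyGet? map mr).getD []).length "house",
           ho ++ scanRowT ((PySem.List.pyGet? map mr).getD []) mr 0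
             ((PySem.List.pyGet? map mr).getD []).length "hospital") := by
      simp only [stepOuterA]
      rw [pv_foldl_const_step, pv_length_pyRange_zero]
      simp [inner_iter]
    rw [h1, ih, collT_succ_left, collT_succ_left]
    simp only [Prod.mk.injEq, List.append_assoc]
    exact ⟨by push_cast; ring, trivial⟩

-- what one B row-fold contributes to the bucket of key tgt
lemma rowFoldB_getD (r : Int) (tgt : String) (ps : List (Int × String)) :
    ∀ (d : PySem.Dict String (List (Int × Int))),
    (ps.foldl (fun d p => d.modify p.2 [] (fun l => l ++ [(r, p.1)])) d).getD tgt []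
      = d.getD tgt [] ++ ps.filterMap (fun p => if p.2 = tgt then some (r, p.1) else none) := by
  induction ps with
  | nil => intro d; simp
  | cons a ps ih =>
    intro d
    simp only [List.foldl_cons, List.filterMap_cons, ih]
    by_cases h : a.2 = tgt
    · rw [h, PySem.Dict.getD_modify_self]
      simp
    · rw [PySem.Dict.getD_modify_of_ne _ _ _ (fun he => h he.symm)]
      simp [h]

-- B's bucket contribution of one row equals A's plain (offset-0) scan of that row
lemma rowStepB_getD (r : Int) (cells : List String) (tgt : String)
    (d : PySem.Dict String (List (Int × Int))) :
    (rowStepB r cells d).getD tgt []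
      = d.getD tgt [] ++ scanRowT cells r 0 cells.length tgt := by
  unfold rowStepB
  rw [rowFoldB_getD]
  congr 1
  rw [PySem.List.enumerate_eq_map_pyRange _ ""]
  simp only [PySem.List.len]
  rw [PySem.List.pyRange_zero_natCast, List.filterMap_map, List.filterMap_map]
  unfold scanRowT
  refine List.filterMap_congr (fun p _ => ?_)
  simp [PySem.List.pyGetD, PySem.List.pyGet?]

lemma scanB_getD (map : List (List String)) (tgt : String) (n : Nat) :
    ∀ (r : Int) (d : PySem.Dict String (List (Int × Int))),
    (scanB map n r d).getD tgt [] = d.getD tgt [] ++ collT map r n tgt := by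
  induction n with
  | zero => intro r d; simp [scanB, collT]
  | succ k ih =>
    intro r d
    rw [scanB, ih, rowStepB_getD, collT_succ_left, List.append_assoc]

lemma alt_repr (mapRow e : Int) (map : List (List String)) (row col : Int) :
    findPlaces_alt mapRow e map row col
      = (collT map mapRow row.toNat "house", collT map mapRow row.toNat "hospital") := by
  unfold findPlaces_alt
  simp only [scanB_getD]
  simp

lemma pv_pyGet?_neg {α : Type} (xs : List α) (i : Int) (h1 : -(xs.length : Int) ≤ i) (h2 : i < 0) :
    PySem.List.pyGet? xs i = xs[((xs.length : Int) + i).toNat]? := by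
  have hn : ¬ (0 ≤ i) := by omega
  have hk : xs.length - (-i).toNat = ((xs.length : Int) + i).toNat := by omega
  simp [PySem.List.pyGet?, PySem.List.pyIdx?, hn, h1, hk]

lemma pv_mem_drop_of_le {l : List String} {b j : Nat} (hbj : b ≤ j) (hj : j < l.length) :
    l[j] ∈ l.drop b := by
  have hlt : j - b < (l.drop b).length := by simp; omega
  have heq : (l.drop b)[j - b] = l[j] := by rw [List.getElem_drop]; congr 1; omega
  rw [← heq]; exact List.getElem_mem hlt

lemma pv_pyGetD_eq {α : Type} (xs : List α) (i : Int) (d : α) :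
    PySem.List.pyGetD xs i d = (PySem.List.pyGet? xs i).getD d := by
  simp [PySem.List.pyGetD, PySem.List.pyGet?]

lemma pv_slice_neg {α : Type} (xs : List α) (a : Int) (h : a < 0) :
    PySem.List.slice xs (some a) none = xs.drop ((xs.length : Int) + a).toNat := by
  have hc : PySem.List.clampIdx xs.length a = ((xs.length : Int) + a).toNat := by
    simp [PySem.List.clampIdx, h]; omega
  simp [PySem.List.slice, hc]

-- D_'s wrapped tail, written as the drop the proofs use
lemma pv_tail_eq (map : List (List String)) (mapRow e : Int) (he : e < 0) :
    PySem.List.slice (PySem.List.pyGetD map mapRow []) (some e)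
      = ((PySem.List.pyGet? map mapRow).getD []).drop
          (((((PySem.List.pyGet? map mapRow).getD []).length : Int) + e).toNat) := by
  rw [pv_pyGetD_eq, pv_slice_neg _ _ he]

-- A's offset first-row scan equals the plain scan when the wrapped tail holds no target cell
lemma scan_shift (rowL : List String) (r e : Int) (tgt : String)
    (h1 : -(rowL.length : Int) ≤ e) (h2 : e ≤ 0)
    (hclean : ∀ s ∈ rowL.drop (((rowL.length : Int) + e).toNat), ¬ (s = tgt)) :
    scanRowT rowL r e rowL.length tgt = scanRowT rowL r 0 rowL.length tgt := by
  by_cases he : e = 0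
  · rw [he]
  · have he' : e < 0 := lt_of_le_of_ne h2 he
    have hbtoNat : (((rowL.length : Nat) : Int) + e).toNat = rowL.length - (-e).toNat := by omega
    rw [hbtoNat] at hclean
    set n := rowL.length with hn
    set a := (-e).toNat with hadef
    set b := n - a with hbdef
    have han : a ≤ n := by omega
    have ha : (a : Int) = -e := by omega
    have hcell : ∀ j : Nat, b ≤ j → j < n → ¬ (rowL[j]?.getD "" = tgt) := by
      intro j hbj hjn hj
      rw [List.getElem?_eq_getElem (show j < rowL.length by omega)] at hj
      exact hclean _ (pv_mem_drop_of_le hbj (by omega)) hj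
    have hsplit1 : List.range n = List.range a ++ (List.range b).map (fun x => a + x) := by
      rw [show n = a + b by omega]; exact List.range_add
    have hsplit2 : List.range n = List.range b ++ (List.range a).map (fun x => b + x) := by
      rw [show n = b + a by omega]; exact List.range_add
    unfold scanRowT
    conv_lhs => rw [hsplit1]
    conv_rhs => rw [hsplit2]
    rw [List.filterMap_append, List.filterMap_append, List.filterMap_map, List.filterMap_map]
    have hheadL : (List.range a).filterMap
        (fun (p : Nat) => if (PySem.List.pyGet? rowL (e + (p : Int))).getD "" = tgt
          then some (r, e + (p : Int)) else none) = [] := by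
      rw [List.filterMap_eq_nil_iff]
      intro p hp
      rw [List.mem_range] at hp
      rw [pv_pyGet?_neg rowL _ (by omega) (by omega)]
      rw [show (((rowL.length : Nat) : Int) + (e + (p : Int))).toNat = b + p by omega]
      rw [if_neg (hcell (b + p) (by omega) (by omega))]
    have htailR : (List.range a).filterMap
        ((fun (p : Nat) => if (PySem.List.pyGet? rowL ((0 : Int) + (p : Int))).getD "" = tgt
          then some (r, (0 : Int) + (p : Int)) else none) ∘ (fun x => b + x)) = [] := by
      rw [List.filterMap_eq_nil_iff]
      intro p hp
      rw [List.mem_range] at hp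
      simp only [Function.comp, zero_add, PySem.List.pyGet?_natCast]
      rw [if_neg (hcell (b + p) (by omega) (by omega))]
    have hmid : (List.range b).filterMap
        ((fun (p : Nat) => if (PySem.List.pyGet? rowL (e + (p : Int))).getD "" = tgt
          then some (r, e + (p : Int)) else none) ∘ (fun x => a + x))
        = (List.range b).filterMap
        (fun (p : Nat) => if (PySem.List.pyGet? rowL ((0 : Int) + (p : Int))).getD "" = tgt
          then some (r, (0 : Int) + (p : Int)) else none) := by
      refine List.filterMap_congr (fun p _ => ?_)
      simp only [Function.comp]
      rw [show e + ((a + p : Nat) : Int) = (0 : Int) + (p : Int) by push_cast; omega]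
    rw [hheadL, htailR, hmid, List.nil_append, List.append_nil]

-- A's result for row > 0: offset scan of the first row, then plain rows
lemma findPlaces_repr (mapRow e : Int) (map : List (List String)) (row col : Int) (m : Nat)
    (hm : row.toNat = m + 1) :
    findPlaces mapRow e map row col =
      (scanRowT ((PySem.List.pyGet? map mapRow).getD []) mapRow e
          ((PySem.List.pyGet? map mapRow).getD []).length "house" ++ collT map (mapRow + 1) m "house",
       scanRowT ((PySem.List.pyGet? map mapRow).getD []) mapRow e
          ((PySem.List.pyGet? map mapRow).getD []).length "hospital" ++ collT map (mapRow + 1) m "hospital") := by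
  unfold findPlaces
  rw [pv_foldl_const_step, pv_length_pyRange_zero, hm, Function.iterate_succ_apply]
  have hstep : stepOuterA map (mapRow, e, ([] : List (Int × Int)), ([] : List (Int × Int)))
      = (mapRow + 1, 0,
         scanRowT ((PySem.List.pyGet? map mapRow).getD []) mapRow e
           ((PySem.List.pyGet? map mapRow).getD []).length "house",
         scanRowT ((PySem.List.pyGet? map mapRow).getD []) mapRow e
           ((PySem.List.pyGet? map mapRow).getD []).length "hospital") := by
    simp only [stepOuterA]
    rw [pv_foldl_const_step, pv_length_pyRange_zero]
    simp [inner_iter]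
  rw [hstep, outer_iter]

lemma collT_snd_nonneg (tgt : String) (mr : Int) (map : List (List String)) (k : Nat) :
    ∀ x ∈ collT map mr k tgt, 0 ≤ x.2 := by
  intro x hx
  simp only [collT, scanRowT, List.mem_flatMap, List.mem_filterMap] at hx
  obtain ⟨i, _, p, _, hx⟩ := hx
  split_ifs at hx with h
  cases hx; simp

-- ===== VERDICT (by name: the statement is the Claim_ definition above) =====
theorem findPlaces_spec : Claim_unchanged_findPlaces := by
  intro mapRow e map row col hdom hpre hnd
  by_cases hrow : row ≤ 0
  · have h0 : row.toNat = 0 := by omega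
    have hempty : PySem.List.pyRange 0 row 1 = [] := by
      have hl := pv_length_pyRange_zero row
      rw [h0] at hl
      exact List.eq_nil_of_length_eq_zero hl
    unfold findPlaces
    rw [hempty, alt_repr, h0]
    simp [collT]
  · have hrow' : 0 < row := by omega
    obtain ⟨m, hm⟩ : ∃ m, row.toNat = m + 1 := ⟨row.toNat - 1, by omega⟩
    rw [findPlaces_repr _ _ _ _ _ m hm, alt_repr, hm, collT_succ_left, collT_succ_left]
    rcases hpre.2 hrow' with hc0 | ⟨hge, hle⟩
    · rw [hc0]
      simp [scanRowT]
    · by_cases he0 : e < 0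
      · have hclean : ∀ s ∈ ((PySem.List.pyGet? map mapRow).getD []).drop
            (((((PySem.List.pyGet? map mapRow).getD []).length : Int) + e).toNat),
            ¬ (s = "house" ∨ s = "hospital") := by
          intro s hs hc
          exact hnd ⟨hrow', he0, s, by rw [pv_tail_eq map mapRow e he0]; exact hs, hc⟩
        rw [scan_shift _ _ _ "house" hge hle
              (fun s hs h => hclean s hs (Or.inl h)),
            scan_shift _ _ _ "hospital" hge hle
              (fun s hs h => hclean s hs (Or.inr h))]
      · rw [show e = (0 : Int) by omega]

theorem findPlaces_changed : Claim_changed_findPlaces := by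
  unfold Claim_changed_findPlaces; decide

theorem findPlaces_tight : Claim_exact_findPlaces := by
  intro mapRow e map row col hdom hpre hD heq
  unfold D_findPlaces at hD
  obtain ⟨hrow', he0, s, hs, hstgt⟩ := hD
  rw [pv_tail_eq map mapRow e he0] at hs
  rcases hpre.2 hrow' with hc0 | ⟨hge, hle⟩
  · rw [List.eq_nil_of_length_eq_zero hc0] at hs
    simp at hs
  · obtain ⟨q, hq, hsq⟩ := List.mem_iff_getElem.mp hs
    rw [List.length_drop] at hq
    set row0 := (PySem.List.pyGet? map mapRow).getD [] with hrow0
    set b := (((row0.length : Nat) : Int) + e).toNat with hbdef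
    have hjn : b + q < row0.length := by omega
    have hsval : row0[b + q]'hjn = s := by
      rw [← hsq, List.getElem_drop]
    have hget : PySem.List.pyGet? row0 (e + (q : Int)) = row0[b + q]? := by
      rw [pv_pyGet?_neg row0 _ (by omega) (by omega)]
      congr 1
      omega
    obtain ⟨m, hm⟩ : ∃ m, row.toNat = m + 1 := ⟨row.toNat - 1, by omega⟩
    rw [findPlaces_repr _ _ _ _ _ m hm, alt_repr] at heq
    have hmemS : ∀ tgt : String, s = tgt →
        (mapRow, e + (q : Int)) ∈ scanRowT row0 mapRow e row0.length tgt := by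
      intro tgt hstgt'
      unfold scanRowT
      rw [List.mem_filterMap]
      refine ⟨q, List.mem_range.mpr (by omega), ?_⟩
      rw [hget, List.getElem?_eq_getElem hjn, hsval]
      simp [hstgt']
    have hqneg : e + (q : Int) < 0 := by omega
    rcases hstgt with h | h
    · have hx := hmemS "house" h
      have hmem : (mapRow, e + (q : Int)) ∈ collT map mapRow row.toNat "house" := by
        have hfst := congrArg Prod.fst heq
        simp only at hfst
        rw [← hfst]
        exact List.mem_append_left _ hx
      have := collT_snd_nonneg "house" mapRow map row.toNat _ hmem
      simp at this
      omega
    · have hx := hmemS "hospital" h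
      have hmem : (mapRow, e + (q : Int)) ∈ collT map mapRow row.toNat "hospital" := by
        have hsnd := congrArg Prod.snd heq
        simp only at hsnd
        rw [← hsnd]
        exact List.mem_append_left _ hx
      have := collT_snd_nonneg "hospital" mapRow map row.toNat _ hmem
      simp at this
      omega
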